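-- pv_equiv track=rewrite | github.com/Heps-akint/Microverse | microverse.py | build_noise_scales
-- ===== SOURCE A (Python) =====
-- from typing import List, Optional, Tuple
--
-- def build_noise_scales(width: int, height: int) -> List[int]:
--     min_dim = max(4, min(width, height))
--     base = max(4, min_dim // 2)
--     scales = [base]
--     for _ in range(3):
--         base = max(2, base // 2)
--         if base == scales[-1]:
--             break
--         scales.append(base)
--     return scales
-- ===== SOURCE B (Python) =====
-- def build_noise_scales(width: int, height: int):
--     # Closed form: the halving sequence clamped at 2 is fully determined by base's range.
--     base = max(4, max(4, min(width, height)) // 2)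
--     if base <= 5:
--         return [base, 2]
--     if base <= 7:
--         return [base, 3, 2]
--     if base <= 11:
--         return [base, base // 2, 2]
--     return [base, base // 2, base // 4, max(2, base // 8)]
-- ===== Notes on version B (the rewrite author's own statement) =====
-- stated objective: alternative
-- what changed: B replaces A's stateful halving loop with early break by a loop-free closed-form: a piecewise arithmetic formula that returns the exact list directly from base's range (base<=5, <=7, <=11, >=12).
import Mathlib
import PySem

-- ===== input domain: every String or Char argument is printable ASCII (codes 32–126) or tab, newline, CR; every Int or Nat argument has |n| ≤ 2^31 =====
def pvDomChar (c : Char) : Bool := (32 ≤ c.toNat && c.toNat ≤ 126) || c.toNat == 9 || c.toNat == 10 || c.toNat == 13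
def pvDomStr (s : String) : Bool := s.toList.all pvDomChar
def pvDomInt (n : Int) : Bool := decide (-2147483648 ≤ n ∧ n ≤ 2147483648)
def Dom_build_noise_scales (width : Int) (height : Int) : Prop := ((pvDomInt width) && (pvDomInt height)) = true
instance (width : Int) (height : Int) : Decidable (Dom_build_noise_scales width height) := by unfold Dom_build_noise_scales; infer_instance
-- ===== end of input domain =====

-- B replaces A's stateful halving loop (with early break) by a loop-free closed-form
-- piecewise formula giving the list directly from base's range (alternative; same cost).

-- ===== PORT A =====
-- one loop step of A: state = (scales, base, broken); 'broken' models Python's break.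
-- scales[-1]: scales is never empty (it starts as [base]), so the .getD default is never used.
def pvStepA (st : List Int × Int × Bool) (_ : Nat) : List Int × Int × Bool :=
  match st with
  | (scales, base, broken) =>
    if broken then (scales, base, broken)
    else
      let base' := max 2 (PySem.Int.floordiv base 2)
      if base' = (PySem.List.pyGet? scales (-1)).getD 0 then (scales, base', true)
      else (scales ++ [base'], base', false)

def build_noise_scales (width : Int) (height : Int) : List Int :=
  let min_dim := max 4 (min width height)
  let base := max 4 (PySem.Int.floordiv min_dim 2)
  (((List.range 3).foldl pvStepA ([base], base, false))).1

-- ===== PORT B =====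
def build_noise_scales_alt (width : Int) (height : Int) : List Int :=
  let base := max 4 (PySem.Int.floordiv (max 4 (min width height)) 2)
  if base ≤ 5 then [base, 2]
  else if base ≤ 7 then [base, 3, 2]
  else if base ≤ 11 then [base, PySem.Int.floordiv base 2, 2]
  else [base, PySem.Int.floordiv base 2, PySem.Int.floordiv base 4,
        max 2 (PySem.Int.floordiv base 8)]

-- ===== PRECONDITION & SPEC =====
def Spec_build_noise_scales (width : Int) (height : Int) (out : List Int) : Prop := out = build_noise_scales_alt width height
instance (width : Int) (height : Int) (out : List Int) : Decidable (Spec_build_noise_scales width height out) := by unfold Spec_build_noise_scales; infer_instance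

-- ===== CLAIM =====
def Claim_equal_build_noise_scales : Prop := ∀ (width : Int) (height : Int), Dom_build_noise_scales width height → Spec_build_noise_scales width height (build_noise_scales width height)

-- ===== LEMMAS AND PROOFS =====

-- core: for any base b ≥ 4 the unrolled loop of A equals B's piecewise formula
theorem pv_core (b : Int) (hb : 4 ≤ b) :
    (((List.range 3).foldl pvStepA ([b], b, false))).1
      = if b ≤ 5 then [b, 2]
        else if b ≤ 7 then [b, 3, 2]
        else if b ≤ 11 then [b, b / 2, 2]
        else [b, b / 2, b / 4, max 2 (b / 8)] := by
  have hr3 : List.range 3 = [0,1,2] := by decide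
  rw [hr3]
  simp only [List.foldl]
  by_cases h5 : b ≤ 5
  · have A1 : pvStepA ([b], b, false) 0 = ([b, 2], 2, false) := by
      simp [pvStepA, PySem.List.pyGet?, PySem.List.pyIdx?]
      rw [show max 2 (b / 2) = 2 from by omega, if_neg (by omega)]
    have A2 : pvStepA ([b, 2], 2, false) 1 = ([b, 2], 2, true) := by
      simp [pvStepA, PySem.Int.floordiv, PySem.List.pyGet?, PySem.List.pyIdx?]
    rw [A1, A2]
    simp [pvStepA, h5]
  by_cases h7 : b ≤ 7
  · have A1 : pvStepA ([b], b, false) 0 = ([b, 3], 3, false) := by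
      simp [pvStepA, PySem.List.pyGet?, PySem.List.pyIdx?]
      rw [show max 2 (b / 2) = 3 from by omega, if_neg (by omega)]
    have A2 : pvStepA ([b, 3], 3, false) 1 = ([b, 3, 2], 2, false) := by
      simp [pvStepA, PySem.Int.floordiv, PySem.List.pyGet?, PySem.List.pyIdx?]
    have A3 : pvStepA ([b, 3, 2], 2, false) 2 = ([b, 3, 2], 2, true) := by
      simp [pvStepA, PySem.Int.floordiv, PySem.List.pyGet?, PySem.List.pyIdx?]
    rw [A1, A2, A3]
    simp [h5, h7]
  by_cases h11 : b ≤ 11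
  · have A1 : pvStepA ([b], b, false) 0 = ([b, b / 2], b / 2, false) := by
      simp [pvStepA, PySem.List.pyGet?, PySem.List.pyIdx?]
      rw [show max 2 (b / 2) = b / 2 from by omega, if_neg (by omega)]
    have A2 : pvStepA ([b, b / 2], b / 2, false) 1 = ([b, b / 2, 2], 2, false) := by
      simp [pvStepA, PySem.List.pyGet?, PySem.List.pyIdx?]
      rw [show max 2 (b / 2 / 2) = 2 from by omega, if_neg (by omega)]
    have A3 : pvStepA ([b, b / 2, 2], 2, false) 2 = ([b, b / 2, 2], 2, true) := by
      simp [pvStepA, PySem.Int.floordiv, PySem.List.pyGet?, PySem.List.pyIdx?]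
    rw [A1, A2, A3]
    simp [h5, h7, h11]
  · have A1 : pvStepA ([b], b, false) 0 = ([b, b / 2], b / 2, false) := by
      simp [pvStepA, PySem.List.pyGet?, PySem.List.pyIdx?]
      rw [show max 2 (b / 2) = b / 2 from by omega, if_neg (by omega)]
    have A2 : pvStepA ([b, b / 2], b / 2, false) 1 = ([b, b / 2, b / 4], b / 4, false) := by
      simp [pvStepA, PySem.List.pyGet?, PySem.List.pyIdx?]
      rw [show max 2 (b / 2 / 2) = b / 4 from by omega, if_neg (by omega)]
    have A3 : pvStepA ([b, b / 2, b / 4], b / 4, false) 2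
        = ([b, b / 2, b / 4, max 2 (b / 8)], max 2 (b / 8), false) := by
      simp [pvStepA, PySem.List.pyGet?, PySem.List.pyIdx?]
      rw [show max 2 (b / 4 / 2) = max 2 (b / 8) from by omega, if_neg (by omega)]
    rw [A1, A2, A3]
    simp [h5, h7, h11]

-- ===== VERDICT =====
theorem build_noise_scales_spec : Claim_equal_build_noise_scales := by
  intro w h _
  unfold Spec_build_noise_scales build_noise_scales build_noise_scales_alt
  simp only [PySem.Int.floordiv_eq_ediv_of_pos (show (0:Int) < 2 by norm_num),
    PySem.Int.floordiv_eq_ediv_of_pos (show (0:Int) < 4 by norm_num),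
    PySem.Int.floordiv_eq_ediv_of_pos (show (0:Int) < 8 by norm_num)]
  exact pv_core _ (le_max_left _ _)
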